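-- pv_equiv track=rewrite | github.com/app-app-app-app/site-launcher-test | core/options.py | build_geo_labels
-- ===== SOURCE A (Python) =====
-- from typing import Dict, List, Tuple
--
-- TOP_GEO_ORDER = [
--     # --- Core Europe ---
--     "ES","IT","PL","CZ","SK","HU","TR","DE","RO","PT","BE","NL","FR",
--     "HR","SI","RS","BG","GR",
--     "SE","FI","DK","NO","IS",
--     "EE","LV","LT",
--     "CH","AT",
--
--     # --- UK / Anglosphere ---
--     "GB","IE","AU","NZ","CA","US",
--
--     # --- Asia ---
--     "JP","KR","TH","VN","ID","MY","HK","SG",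
--
--     # --- Middle East ---
--     "IL","AE","SA",
--
--     # --- Americas ---
--     "CR","MX","BR","AR","CL",
--
--     # --- Africa ---
--     "ZA","NG","KE",
-- ]
--
-- def flag_emoji(cc: str) -> str:
--     """
--     'PL' -> 🇵🇱
--     """
--     cc = (cc or "").upper()
--     if len(cc) != 2 or not cc.isalpha():
--         return "🏳️"
--     return chr(0x1F1E6 + ord(cc[0]) - ord("A")) + chr(0x1F1E6 + ord(cc[1]) - ord("A"))
--
-- def build_geo_labels(geo_defaults: dict) -> Tuple[List[str], Dict[str, str]]:
--     """
--     label: "🇵🇱 Польща / Poland (PL)"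
--     Пошук працює за UA/EN/кодом, бо все є в одному рядку.
--     """
--     code_to_label: Dict[str, str] = {}
--
--     for code, meta in geo_defaults.items():
--         ua = meta.get("ua_name") or meta.get("name") or code
--         en = meta.get("name") or ua or code
--         code_to_label[code] = f"{flag_emoji(code)} {ua} / {en} ({code})"
--
--     top = [c for c in TOP_GEO_ORDER if c in code_to_label]
--     rest = [c for c in sorted(code_to_label.keys()) if c not in top]
--     labels = [code_to_label[c] for c in top] + [code_to_label[c] for c in rest]
--
--     label_to_code = {label: code for code, label in code_to_label.items()}
--     return labels, label_to_code
-- ===== SOURCE B (Python) =====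
-- from typing import Dict, List, Tuple
--
-- TOP_GEO_ORDER = [
--     "ES","IT","PL","CZ","SK","HU","TR","DE","RO","PT","BE","NL","FR",
--     "HR","SI","RS","BG","GR",
--     "SE","FI","DK","NO","IS",
--     "EE","LV","LT",
--     "CH","AT",
--     "GB","IE","AU","NZ","CA","US",
--     "JP","KR","TH","VN","ID","MY","HK","SG",
--     "IL","AE","SA",
--     "CR","MX","BR","AR","CL",
--     "ZA","NG","KE",
-- ]
--
-- _RANK = {c: i for i, c in enumerate(TOP_GEO_ORDER)}
--
-- def flag_emoji(cc: str) -> str: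
--     cc = (cc or "").upper()
--     if len(cc) != 2 or not cc.isalpha():
--         return "🏳️"
--     return chr(0x1F1E6 + ord(cc[0]) - ord("A")) + chr(0x1F1E6 + ord(cc[1]) - ord("A"))
--
-- def _label(code: str, meta: dict) -> str:
--     ua = meta.get("ua_name") or meta.get("name") or code
--     en = meta.get("name") or meta.get("ua_name") or code
--     return f"{flag_emoji(code)} {ua} / {en} ({code})"
--
-- def build_geo_labels(geo_defaults: dict) -> Tuple[List[str], Dict[str, str]]:
--     code_to_label = {code: _label(code, meta) for code, meta in geo_defaults.items()}
--     ordered = sorted(code_to_label, key=lambda c: (_RANK.get(c, len(TOP_GEO_ORDER)), c))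
--     labels = [code_to_label[c] for c in ordered]
--     return labels, {label: code for code, label in code_to_label.items()}
-- ===== Notes on version B (the rewrite author's own statement) =====
-- stated objective: idiomatic
-- what changed: A's two-pass partition (scan TOP_GEO_ORDER for present codes, then alphabetically sort the keys and filter out the top group, then concatenate) is replaced by building a rank table once and doing a single sorted() of the codes under the (rank, code) key; the or-chain for the English name is flattened to name-or-ua_name-or-code.
import Mathlib
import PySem

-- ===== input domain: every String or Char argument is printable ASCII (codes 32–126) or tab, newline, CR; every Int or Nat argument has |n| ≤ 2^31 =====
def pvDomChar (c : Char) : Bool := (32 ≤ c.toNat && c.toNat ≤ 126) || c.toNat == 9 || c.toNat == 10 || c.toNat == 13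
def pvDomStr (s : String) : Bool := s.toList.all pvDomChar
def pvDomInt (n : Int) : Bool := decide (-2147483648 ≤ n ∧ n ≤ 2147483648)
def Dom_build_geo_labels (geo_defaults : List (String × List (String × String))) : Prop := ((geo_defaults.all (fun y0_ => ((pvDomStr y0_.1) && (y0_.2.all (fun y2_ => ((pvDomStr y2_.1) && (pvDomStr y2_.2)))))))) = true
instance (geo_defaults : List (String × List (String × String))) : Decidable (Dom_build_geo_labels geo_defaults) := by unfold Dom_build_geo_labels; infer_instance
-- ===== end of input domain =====

-- B replaces A's two-list partition (TOP_GEO_ORDER scan + sorted-rest scan) by one sort of the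
-- codes under a precomputed rank table with (rank, code) keys — an idiomatic decomposition, not faster.

-- ===== PORT A =====
-- shared module context: the constant and the flag_emoji helper both Pythons define identically
def TOP_GEO_ORDER : List String :=
  ["ES","IT","PL","CZ","SK","HU","TR","DE","RO","PT","BE","NL","FR",
   "HR","SI","RS","BG","GR",
   "SE","FI","DK","NO","IS",
   "EE","LV","LT",
   "CH","AT",
   "GB","IE","AU","NZ","CA","US",
   "JP","KR","TH","VN","ID","MY","HK","SG",
   "IL","AE","SA",
   "CR","MX","BR","AR","CL",
   "ZA","NG","KE"]

def pvFlagEmoji (cc0 : String) : String :=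
  let cc := PySem.Str.upper cc0
  if (PySem.Str.len cc != 2) || !(PySem.Str.strIsalpha cc) then "🏳️"
  else
    match cc.toList with
    | [a, b] => String.ofList [Char.ofNat (0x1F1E6 + a.toNat - 65), Char.ofNat (0x1F1E6 + b.toNat - 65)]
    | _ => "🏳️"   -- unreachable: len cc = 2

-- Python's `x or y` on an optional string (falsy = None or "")
def pvOrStr (o : Option String) (dflt : String) : String :=
  match o with
  | some s => if s = "" then dflt else s
  | none => dflt

-- meta.get(k): first-match lookup in the association list
def pvMetaGet (m : List (String × String)) (k : String) : Option String :=
  (PySem.Dict.mk m).get? k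

-- the f-string
def pvLabel (code ua en : String) : String :=
  pvFlagEmoji code ++ " " ++ ua ++ " / " ++ en ++ " (" ++ code ++ ")"

-- A's loop body: ua = meta.get("ua_name") or meta.get("name") or code; en = meta.get("name") or ua or code
def pvCodeToLabelA (geo_defaults : List (String × List (String × String))) : PySem.Dict String String :=
  geo_defaults.foldl
    (fun d p =>
      let ua := pvOrStr (pvMetaGet p.2 "ua_name") (pvOrStr (pvMetaGet p.2 "name") p.1)
      let en := pvOrStr (pvMetaGet p.2 "name") (pvOrStr (some ua) p.1)
      d.insert p.1 (pvLabel p.1 ua en))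
    PySem.Dict.empty

-- {label: code for code, label in code_to_label.items()} (identical comprehension in both Pythons)
def pvReverse (d : PySem.Dict String String) : PySem.Dict String String :=
  d.items.foldl (fun r p => r.insert p.2 p.1) PySem.Dict.empty

def build_geo_labels (geo_defaults : List (String × List (String × String))) : List String × (List (String × String)) :=
  let code_to_label := pvCodeToLabelA geo_defaults
  let top := TOP_GEO_ORDER.filter (fun c => code_to_label.contains c)
  let rest := (PySem.List.sorted code_to_label.keys (fun x => x)).filter (fun c => !(top.contains c))
  let labels := top.map (fun c => code_to_label.getD c "") ++ rest.map (fun c => code_to_label.getD c "")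
  (labels, (pvReverse code_to_label).items)

-- ===== PORT B =====
-- _RANK = {c: i for i, c in enumerate(TOP_GEO_ORDER)}
def pvRank : PySem.Dict String Int :=
  (PySem.List.enumerate TOP_GEO_ORDER 0).foldl (fun d p => d.insert p.2 p.1) PySem.Dict.empty

-- B's _label helper: en = meta.get("name") or meta.get("ua_name") or code
def pvLabelB (code : String) (m : List (String × String)) : String :=
  let ua := pvOrStr (pvMetaGet m "ua_name") (pvOrStr (pvMetaGet m "name") code)
  let en := pvOrStr (pvMetaGet m "name") (pvOrStr (pvMetaGet m "ua_name") code)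
  pvLabel code ua en

def pvCodeToLabelB (geo_defaults : List (String × List (String × String))) : PySem.Dict String String :=
  geo_defaults.foldl (fun d p => d.insert p.1 (pvLabelB p.1 p.2)) PySem.Dict.empty

def build_geo_labels_alt (geo_defaults : List (String × List (String × String))) : List String × (List (String × String)) :=
  let code_to_label := pvCodeToLabelB geo_defaults
  let ordered := PySem.List.sorted2 code_to_label.keys
                   (fun c => pvRank.getD c (TOP_GEO_ORDER.length : Int)) (fun c => c)
  let labels := ordered.map (fun c => code_to_label.getD c "")
  (labels, (pvReverse code_to_label).items)

-- ===== PRECONDITION & SPEC =====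
def Spec_build_geo_labels (geo_defaults : List (String × List (String × String))) (out : List String × (List (String × String))) : Prop := out = build_geo_labels_alt geo_defaults
instance (geo_defaults : List (String × List (String × String))) (out : List String × (List (String × String))) : Decidable (Spec_build_geo_labels geo_defaults out) := by unfold Spec_build_geo_labels; infer_instance

-- ===== CLAIM (what is proved, stated in full; the proofs are below) =====
def Claim_equal_build_geo_labels : Prop := ∀ (geo_defaults : List (String × List (String × String))), Dom_build_geo_labels geo_defaults → Spec_build_geo_labels geo_defaults (build_geo_labels geo_defaults)

-- ===== LEMMAS AND PROOFS =====

-- Python `or`-chains: meta.get("name") or (ua_name or name or code) or code = name or ua_name or code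
theorem pv_en_eq (o₁ o₂ : Option String) (code : String) :
    pvOrStr o₂ (pvOrStr (some (pvOrStr o₁ (pvOrStr o₂ code))) code) = pvOrStr o₂ (pvOrStr o₁ code) := by
  rcases o₁ with _ | s₁ <;> rcases o₂ with _ | s₂ <;> simp [pvOrStr] <;> split_ifs <;> simp_all

theorem pv_ctl_eq (gd : List (String × List (String × String))) :
    pvCodeToLabelA gd = pvCodeToLabelB gd := by
  unfold pvCodeToLabelA pvCodeToLabelB
  refine PySem.List.foldl_congr_mem gd _ _ _ (fun d p _ => ?_)
  simp only [pvLabelB, pvLabel, pv_en_eq]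

-- sorted(xs, key=lambda c:(k1(c),k2(c))) is a plain sort under the lexicographic key
theorem pv_sorted2_eq_sorted_toLex {α : Type} (xs : List α) (k1 : α → Int) (k2 : α → String) :
    PySem.List.sorted2 xs k1 k2 = PySem.List.sorted xs (fun a => toLex (k1 a, k2 a)) := by
  rw [PySem.List.sorted_eq_foldl_insertBy]
  show List.foldl (fun acc x => PySem.List.insertBy
      (fun a b => decide (k1 a < k1 b) || (!decide (k1 b < k1 a) && decide (k2 a < k2 b))) x acc) [] xs = _
  congr 1
  funext acc x
  congr 1
  funext a b
  rcases lt_trichotomy (k1 a) (k1 b) with h | h | h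
  · simp [Prod.Lex.lt_iff, h]
  · simp [Prod.Lex.lt_iff, h]
  · simp [Prod.Lex.lt_iff, h, not_lt.mpr h.le, h.ne']

set_option maxRecDepth 100000 in
theorem pv_rank_map : TOP_GEO_ORDER.map (fun c => pvRank.getD c (TOP_GEO_ORDER.length : Int))
    = (List.range TOP_GEO_ORDER.length).map Int.ofNat := by decide

set_option maxRecDepth 100000 in
theorem pv_rank_keys : pvRank.keys = TOP_GEO_ORDER := by decide

theorem pv_rank_at (i : Nat) (hi : i < TOP_GEO_ORDER.length) :
    pvRank.getD (TOP_GEO_ORDER[i]) (TOP_GEO_ORDER.length : Int) = (i : Int) := by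
  have h := congrArg (fun l => l[i]?) pv_rank_map
  simp only [List.getElem?_map, List.getElem?_range, hi, List.getElem?_eq_getElem,
    Option.map_some] at h
  exact_mod_cast Option.some.inj h

theorem pv_rank_lt {c : String} (h : c ∈ TOP_GEO_ORDER) :
    pvRank.getD c (TOP_GEO_ORDER.length : Int) < (TOP_GEO_ORDER.length : Int) := by
  obtain ⟨i, hi, hc⟩ := List.mem_iff_getElem.mp h
  rw [← hc, pv_rank_at i hi]
  exact_mod_cast hi

theorem pv_rank_default {c : String} (h : c ∉ TOP_GEO_ORDER) :
    pvRank.getD c (TOP_GEO_ORDER.length : Int) = (TOP_GEO_ORDER.length : Int) := by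
  rw [PySem.Dict.getD_eq_get?_getD,
    (PySem.Dict.get?_eq_none_iff_not_mem_keys _ _).mpr (pv_rank_keys ▸ h)]
  rfl

theorem pv_rank_pairwise :
    TOP_GEO_ORDER.Pairwise (fun a b =>
      pvRank.getD a (TOP_GEO_ORDER.length : Int) < pvRank.getD b (TOP_GEO_ORDER.length : Int)) := by
  rw [List.pairwise_iff_getElem]
  intro i j hi hj hij
  rw [pv_rank_at i hi, pv_rank_at j hj]
  exact_mod_cast hij

-- the heart: B's single (rank, code) sort equals A's top-partition ++ alphabetic rest
set_option maxRecDepth 100000 in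
theorem pv_ordered_eq (d : PySem.Dict String String) (hnd : d.keys.Nodup) :
    PySem.List.sorted2 d.keys (fun c => pvRank.getD c (TOP_GEO_ORDER.length : Int)) (fun c => c)
      = TOP_GEO_ORDER.filter (fun c => d.contains c)
        ++ (PySem.List.sorted d.keys (fun x => x)).filter
             (fun c => !((TOP_GEO_ORDER.filter (fun c => d.contains c)).contains c)) := by
  have hTOPnd : TOP_GEO_ORDER.Nodup := by decide
  set ks := d.keys with hks
  set top := TOP_GEO_ORDER.filter (fun c => d.contains c) with htop
  set rest := (PySem.List.sorted ks (fun x => x)).filter (fun c => !(top.contains c)) with hrest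
  have hmtop : ∀ c, c ∈ top ↔ c ∈ TOP_GEO_ORDER ∧ c ∈ ks := by
    intro c
    simp [htop, List.mem_filter, PySem.Dict.contains_eq_decide_mem_keys, ← hks]
  have hsp : (PySem.List.sorted ks (fun x : String => x)).Perm ks :=
    PySem.List.sorted_perm ks (fun x => x) false
  have hmrest : ∀ c, c ∈ rest ↔ c ∈ ks ∧ c ∉ TOP_GEO_ORDER := by
    intro c
    simp only [hrest, List.mem_filter, hsp.mem_iff, Bool.not_eq_eq_eq_not, Bool.not_true,
      List.contains_eq_mem, decide_eq_false_iff_not]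
    constructor
    · rintro ⟨hk, hne⟩
      exact ⟨hk, fun hT => hne ((hmtop c).mpr ⟨hT, hk⟩)⟩
    · rintro ⟨hk, hne⟩
      exact ⟨hk, fun ht => hne ((hmtop c).mp ht).1⟩
  have hndtop : top.Nodup := hTOPnd.filter _
  have hndrest : rest.Nodup := (hsp.nodup_iff.mpr hnd).filter _
  have hperm : (top ++ rest).Perm ks := by
    rw [List.perm_ext_iff_of_nodup (by
      refine List.Nodup.append hndtop hndrest ?_
      intro c hct hcr
      exact ((hmrest c).mp hcr).2 ((hmtop c).mp hct).1) hnd]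
    intro c
    simp only [List.mem_append, hmtop, hmrest]
    by_cases hT : c ∈ TOP_GEO_ORDER <;> by_cases hk : c ∈ ks <;> simp [hT, hk]
  refine Eq.trans (pv_sorted2_eq_sorted_toLex ks _ _) ?_
  refine PySem.List.sorted_eq_of_perm_of_pairwise_lt _ _ _ hperm ?_
  rw [List.pairwise_append]
  refine ⟨?_, ?_, ?_⟩
  · exact (pv_rank_pairwise.sublist List.filter_sublist).imp
      (fun h => Prod.Lex.lt_iff.mpr (Or.inl h))
  · have hle : (PySem.List.sorted ks (fun x : String => x)).Pairwise (fun a b => a ≤ b) :=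
      PySem.List.sorted_pairwise ks (fun x => x)
    have hne : (PySem.List.sorted ks (fun x : String => x)).Pairwise (fun a b => a ≠ b) :=
      hsp.nodup_iff.mpr hnd
    have hlt : rest.Pairwise (fun a b : String => a < b) :=
      ((hle.and hne).imp (fun h => lt_of_le_of_ne h.1 h.2)).sublist List.filter_sublist
    refine hlt.imp_of_mem (fun {a b} ha hb h => ?_)
    refine Prod.Lex.lt_iff.mpr (Or.inr ⟨?_, h⟩)
    show pvRank.getD a _ = pvRank.getD b _
    rw [pv_rank_default ((hmrest a).mp ha).2, pv_rank_default ((hmrest b).mp hb).2]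
  · intro a ha b hb
    refine Prod.Lex.lt_iff.mpr (Or.inl ?_)
    show pvRank.getD a _ < pvRank.getD b _
    rw [pv_rank_default ((hmrest b).mp hb).2]
    exact pv_rank_lt ((hmtop a).mp ha).1

-- ===== VERDICT (by name: the statement is the Claim_ definition above) =====
theorem build_geo_labels_spec : Claim_equal_build_geo_labels := by
  intro gd _
  have hnd : (pvCodeToLabelB gd).keys.Nodup := by
    unfold pvCodeToLabelB
    exact PySem.Dict.nodup_keys_foldl_insert_key gd Prod.fst _ _ PySem.Dict.nodup_keys_empty
  unfold Spec_build_geo_labels build_geo_labels build_geo_labels_alt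
  dsimp only
  rw [pv_ctl_eq, pv_ordered_eq _ hnd, List.map_append]
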